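-- pv_equiv track=rewrite | github.com/Crippius/whatsapp-wrapped | PDF_Constructor.py | check_text
-- ===== SOURCE A (Python) =====
-- CHAR_PER_LINE = 50
--
-- def check_text(txt:str): # DESCRIPTION: Checks how big the message bubble needs to be
--     # PARAMETERS txt (str): text that is going to be checked
--     # RETURNS: str (one, two, three), it depends on how big the message is
--
--     bubble = 1
--     counter = 0
--     for i in txt:
--         if counter == CHAR_PER_LINE-1 or i == "\n": # If counter reaches limit of characters per line or a line break,
--             bubble += 1                             # increment bubble height and reset counter
--             if bubble == 3:
--                 break
--             counter = -1
--         counter += 1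
--
--     bubble_dict = {1:"one", 2:"two", 3:"three"}
--     return bubble_dict[bubble]
-- ===== SOURCE B (Python) =====
-- CHAR_PER_LINE = 50
--
-- def check_text(txt: str):
--     # Closed form: each '\n' adds a line; each full block of CHAR_PER_LINE chars
--     # in a segment adds a wrap (A's trigger consumes its char, so period is 50).
--     segs = txt.split("\n")
--     total = len(segs) + sum(len(s) // CHAR_PER_LINE for s in segs)
--     return ("one", "two", "three")[min(total, 3) - 1]
-- ===== Notes on version B (the rewrite author's own statement) =====
-- stated objective: simpler
-- what changed: Replaces the per-character counter/break simulation with a closed form: split on newlines, total height = number of segments plus len(segment)//50 wraps per segment, capped with min(total,3).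
import Mathlib
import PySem

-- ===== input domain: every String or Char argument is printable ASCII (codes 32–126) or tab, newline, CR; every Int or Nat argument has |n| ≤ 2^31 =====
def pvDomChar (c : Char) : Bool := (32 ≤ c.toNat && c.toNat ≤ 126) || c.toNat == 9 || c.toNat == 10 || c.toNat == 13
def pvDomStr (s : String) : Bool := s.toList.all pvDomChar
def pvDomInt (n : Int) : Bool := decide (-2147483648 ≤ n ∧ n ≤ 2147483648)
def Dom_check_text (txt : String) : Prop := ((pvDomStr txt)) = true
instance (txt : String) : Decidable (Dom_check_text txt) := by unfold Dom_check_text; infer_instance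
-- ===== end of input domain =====

-- B computes the bubble height in closed form from txt.split("\n") instead of simulating A's per-character counter; equivalence proved for all strings.

-- ===== PORT A =====
-- the for-loop of A: state (bubble, counter), early return on break at bubble == 3
def pvCheckLoop : List Char → Int → Int → Int
  | [], bubble, _ => bubble
  | i :: rest, bubble, counter =>
    if counter == 49 || i == '\n' then          -- counter == CHAR_PER_LINE-1 or i == "\n"
      if bubble + 1 == 3 then bubble + 1        -- break
      else pvCheckLoop rest (bubble + 1) (-1 + 1)   -- counter = -1; counter += 1
    else pvCheckLoop rest bubble (counter + 1)

def check_text (txt : String) : String :=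
  let bubble := pvCheckLoop txt.toList 1 0
  let bubble_dict : PySem.Dict Int String := ⟨[(1, "one"), (2, "two"), (3, "three")]⟩
  (PySem.Dict.get? bubble_dict bubble).getD ""  -- bubble ∈ {1,2,3}: the KeyError branch is unreachable

-- ===== PORT B =====
def check_text_alt (txt : String) : String :=
  let segs := (PySem.Str.split? txt "\n").getD []   -- txt.split("\n"); separator nonempty, never none
  let total : Int := (segs.length : Int) + segs.foldl (fun acc s => acc + PySem.Int.floordiv (PySem.Str.len s) 50) 0
  (PySem.List.pyGet? ["one", "two", "three"] (min total 3 - 1)).getD ""  -- index ∈ {0,1,2}: in range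

-- ===== PRECONDITION & SPEC =====
def Spec_check_text (txt : String) (out : String) : Prop := out = check_text_alt txt
instance (txt : String) (out : String) : Decidable (Spec_check_text txt out) := by unfold Spec_check_text; infer_instance

-- ===== CLAIM (what is proved, stated in full; the proofs are below) =====
def Claim_equal_check_text : Prop := ∀ (txt : String), Dom_check_text txt → Spec_check_text txt (check_text txt)

-- ===== LEMMAS AND PROOFS =====

-- A's loop without the break: the number of bubble increments it performs
def pvCost : List Char → Int → Int
  | [], _ => 0
  | i :: rest, counter =>
    if counter == 49 || i == '\n' then 1 + pvCost rest 0
    else pvCost rest (counter + 1)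

lemma pvCost_nonneg (l : List Char) (c : Int) : 0 ≤ pvCost l c := by
  induction l generalizing c with
  | nil => simp [pvCost]
  | cons i rest ih =>
    simp only [pvCost]
    split
    · have := ih 0; omega
    · exact ih _

-- the break at bubble == 3 is a cap at 3
lemma pvCheckLoop_eq_min (l : List Char) (b c : Int) (hb1 : 1 ≤ b) (hb2 : b ≤ 2) :
    pvCheckLoop l b c = min 3 (b + pvCost l c) := by
  have hneg : (-1 + 1 : Int) = 0 := by norm_num
  induction l generalizing b c with
  | nil =>
    simp only [pvCheckLoop, pvCost, add_zero]
    omega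
  | cons i rest ih =>
    simp only [pvCheckLoop, pvCost, hneg]
    split
    · split
      · rename_i h
        have h3 : b = 2 := by
          have : b + 1 = 3 := by simpa using h
          omega
        have := pvCost_nonneg rest 0
        omega
      · rename_i h
        have hb : b = 1 := by
          have : b + 1 ≠ 3 := by simpa using h
          omega
        rw [ih (b + 1) 0 (by omega) (by omega)]
        have := pvCost_nonneg rest 0
        omega
    · exact ih b (c + 1) hb1 hb2

-- structural recursion computing txt.split("\n") on char lists
def pvSplit : List Char → List (List Char)
  | [] => [[]]
  | c :: rest => if c = '\n' then [] :: pvSplit rest else (pvSplit rest).modifyHead (c :: ·)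

lemma pvSplit_ne_nil (l : List Char) : pvSplit l ≠ [] := by
  induction l with
  | nil => simp [pvSplit]
  | cons c rest ih =>
    simp only [pvSplit]
    split
    · simp
    · cases h : pvSplit rest with
      | nil => exact absurd h ih
      | cons h0 t => simp [List.modifyHead]

set_option maxRecDepth 4000 in
lemma pvSplitOn_go (fuel : Nat) (l cur : List Char) (acc : List (List Char))
    (hf : l.length < fuel) :
    PySem.Chars.splitOn.go ['\n'] fuel l cur acc
      = acc.reverse ++ (pvSplit l).modifyHead (cur.reverse ++ ·) := by
  induction fuel generalizing l cur acc with
  | zero => omega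
  | succ fuel ih =>
    cases l with
    | nil => simp [PySem.Chars.splitOn.go, pvSplit, List.modifyHead]
    | cons c rest =>
      simp only [PySem.Chars.splitOn.go]
      by_cases hc : c = '\n'
      · subst hc
        rw [if_pos (by simp [List.isPrefixOf])]
        simp only [List.length_cons, List.length_nil, List.drop_succ_cons, List.drop_zero]
        rw [ih rest [] (cur.reverse :: acc) (by simpa using hf)]
        have hsplitN : pvSplit ('\n' :: rest) = [] :: pvSplit rest := by simp [pvSplit]
        rw [hsplitN]
        cases h : pvSplit rest with
        | nil => exact absurd h (pvSplit_ne_nil rest)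
        | cons h0 t => simp [List.modifyHead]
      · have hpre : (['\n'].isPrefixOf (c :: rest)) = false := by
          simp [List.isPrefixOf]
          exact fun h => hc h.symm
        rw [if_neg (by simp [hpre])]
        rw [ih rest (c :: cur) acc (by simpa using hf)]
        simp only [pvSplit, if_neg hc]
        cases h : pvSplit rest with
        | nil => exact absurd h (pvSplit_ne_nil rest)
        | cons h0 t => simp [List.modifyHead]

lemma pvSplitOn_eq (l : List Char) : PySem.Chars.splitOn l ['\n'] = pvSplit l := by
  rw [show PySem.Chars.splitOn l ['\n'] = PySem.Chars.splitOn.go ['\n'] (l.length + 1) l [] [] from rfl,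
    pvSplitOn_go (l.length + 1) l [] [] (by omega)]
  cases h : pvSplit l <;> simp [List.modifyHead]

-- wraps + line breaks contributed by the tail segments
def pvWrapSum : List (List Char) → Int
  | [] => 0
  | s :: ss => 1 + ((s.length / 50 : Nat) : Int) + pvWrapSum ss

-- closed form of pvCost: with m newline-free chars already on the current line (counter m % 50)
lemma pvCost_closed (l : List Char) (m : Nat) :
    pvCost l ((m % 50 : Nat) : Int)
      = (((m + (pvSplit l).headI.length) / 50 : Nat) : Int) - ((m / 50 : Nat) : Int)
        + pvWrapSum (pvSplit l).tail := by
  induction l generalizing m with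
  | nil => simp [pvCost, pvSplit, pvWrapSum]
  | cons c rest ih =>
    by_cases hc : c = '\n'
    · subst hc
      simp only [pvCost]
      rw [if_pos (by simp)]
      have h0 := ih 0
      simp only [Nat.zero_mod, Nat.cast_zero, Nat.zero_div, Nat.zero_add] at h0
      rw [h0]
      have hsplitN : pvSplit ('\n' :: rest) = [] :: pvSplit rest := by simp [pvSplit]
      rw [hsplitN]
      cases h : pvSplit rest with
      | nil => exact absurd h (pvSplit_ne_nil rest)
      | cons h0' t =>
        rw [h] at h0
        simp only [List.headI, List.tail, pvWrapSum, List.length_nil, Nat.add_zero] at h0 ⊢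
        omega
    · have harith : (((m + 1) / 50 : Nat) : Int) - ((m / 50 : Nat) : Int)
          = if (m % 50 : Nat) = 49 then 1 else 0 := by
        rw [Nat.succ_div]
        have hdvd : (50 ∣ m + 1) ↔ (m % 50 = 49) := by omega
        split_ifs with h1 h2 h2 <;> simp_all
      have hstep : pvCost (c :: rest) ((m % 50 : Nat) : Int)
          = (if (m % 50 : Nat) = 49 then 1 else 0) + pvCost rest (((m + 1) % 50 : Nat) : Int) := by
        simp only [pvCost]
        by_cases h49 : (m % 50 : Nat) = 49
        · rw [if_pos (by simp [h49])]
          have h0 : ((m + 1) % 50 : Nat) = 0 := by omega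
          simp [h49, h0]
        · rw [if_neg (by simp [hc]; omega)]
          have h1 : ((m + 1) % 50 : Nat) = (m % 50 : Nat) + 1 := by omega
          simp [h49, h1]
      have hsplit : pvSplit (c :: rest) = (pvSplit rest).modifyHead (c :: ·) := by
        simp [pvSplit, hc]
      cases h : pvSplit rest with
      | nil => exact absurd h (pvSplit_ne_nil rest)
      | cons h0' t =>
        rw [hstep, ih (m + 1), hsplit, h]
        simp only [List.modifyHead, List.headI, List.tail, List.length_cons]
        have hm : m + 1 + h0'.length = m + (h0'.length + 1) := by omega
        rw [← hm]
        split_ifs at harith ⊢ <;> omega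

-- B's foldl over the split segments, in terms of the underlying char lists
lemma pvFoldl_sum (ss : List (List Char)) (a : Int) :
    (ss.map String.ofList).foldl (fun acc s => acc + PySem.Int.floordiv (PySem.Str.len s) 50) a
      = a + (ss.map (fun s => ((s.length / 50 : Nat) : Int))).sum := by
  induction ss generalizing a with
  | nil => simp
  | cons s t ih =>
    simp only [List.map_cons, List.foldl_cons, ih, List.sum_cons]
    have hlen : PySem.Str.len (String.ofList s) = (s.length : Int) := by
      simp [PySem.Str.len_eq]
    have hdiv : PySem.Int.floordiv ((s.length : Nat) : Int) 50 = ((s.length / 50 : Nat) : Int) := by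
      simp only [PySem.Int.floordiv]
      rw [Int.fdiv_eq_ediv]
      simp
    rw [hlen, hdiv]; ring

lemma pvWrapSum_eq (ss : List (List Char)) :
    pvWrapSum ss = (ss.length : Int) + (ss.map (fun s => ((s.length / 50 : Nat) : Int))).sum := by
  induction ss with
  | nil => simp [pvWrapSum]
  | cons s t ih => simp [pvWrapSum, ih]; ring

-- the total B computes equals 1 + pvCost at counter 0
lemma pv_total_eq (l : List Char) :
    1 + pvCost l 0
      = ((pvSplit l).length : Int) + ((pvSplit l).map (fun s => ((s.length / 50 : Nat) : Int))).sum := by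
  have h := pvCost_closed l 0
  simp only [Nat.zero_mod, Nat.cast_zero, Nat.zero_div, Nat.zero_add] at h
  cases hs : pvSplit l with
  | nil => exact absurd hs (pvSplit_ne_nil l)
  | cons h0 t =>
    rw [hs] at h
    simp only [List.headI, List.tail] at h
    rw [h, pvWrapSum_eq t]
    simp only [List.length_cons, List.map_cons, List.sum_cons]
    push_cast
    ring

-- ===== VERDICT (by name: the statement is the Claim_ definition above) =====
theorem check_text_spec : Claim_equal_check_text := by
  intro txt _
  unfold Spec_check_text check_text check_text_alt
  have hsplit : (PySem.Str.split? txt "\n").getD [] = (pvSplit txt.toList).map String.ofList := by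
    simp [PySem.Str.split?, PySem.Chars.split?, pvSplitOn_eq]
  simp only [hsplit, pvCheckLoop_eq_min txt.toList 1 0 (by norm_num) (by norm_num),
    pvFoldl_sum (pvSplit txt.toList) 0, List.length_map, zero_add, ← pv_total_eq txt.toList]
  have hge : 0 ≤ pvCost txt.toList 0 := pvCost_nonneg _ _
  set v := pvCost txt.toList 0 with hv
  have hmin : min (1 + v) 3 = min 3 (1 + v) := by omega
  rw [hmin]
  have h3 : min 3 (1 + v) = 1 ∨ min 3 (1 + v) = 2 ∨ min 3 (1 + v) = 3 := by omega
  rcases h3 with h | h | h <;> rw [h] <;> decide
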